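-- pv_equiv track=rewrite | github.com/rajeev1818/spam_classifier.github.io | backend_code/app.py | preprocessing
-- ===== SOURCE A (Python) =====
-- def preprocessing(s):
--     i=0
--     a=""
--     for i in range(len(s)):
--         if (ord(s[i]) >= ord('A') and
--             ord(s[i]) <= ord('Z') or
--             ord(s[i]) >= ord('a') and
--             ord(s[i]) <= ord('z') or
--             ord(s[i]) == ord(' ')):
--             a += s[i]
--     a=' '.join(a.split())
--     a=a.lower()
--     return a
-- ===== SOURCE B (Python) =====
-- def preprocessing(s):
--     # single pass: filter, lowercase and collapse/strip spaces together
--     out = []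
--     last_space = False
--     for c in s:
--         o = ord(c)
--         if 65 <= o <= 90:
--             out.append(chr(o + 32))
--             last_space = False
--         elif 97 <= o <= 122:
--             out.append(c)
--             last_space = False
--         elif o == 32:
--             if out and not last_space:
--                 out.append(' ')
--                 last_space = True
--     if out and out[-1] == ' ':
--         out.pop()
--     return ''.join(out)
-- ===== Notes on version B (the rewrite author's own statement) =====
-- stated objective: faster
-- what changed: Replaces the filter-buffer then space-join-of-split then lower pipeline by one pass that lowercases letters and collapses/strips spaces on the fly with a last-was-space flag.
import Mathlib
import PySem

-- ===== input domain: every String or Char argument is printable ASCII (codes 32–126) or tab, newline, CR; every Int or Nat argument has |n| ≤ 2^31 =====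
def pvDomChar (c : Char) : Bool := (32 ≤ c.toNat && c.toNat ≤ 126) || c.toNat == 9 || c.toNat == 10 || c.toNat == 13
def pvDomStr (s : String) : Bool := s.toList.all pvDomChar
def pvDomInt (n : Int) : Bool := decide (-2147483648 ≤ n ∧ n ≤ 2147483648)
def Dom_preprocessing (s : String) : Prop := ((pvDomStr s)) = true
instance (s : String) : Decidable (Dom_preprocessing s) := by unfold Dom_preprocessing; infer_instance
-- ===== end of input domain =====

-- B replaces A's filter buffer + space-join-of-split + lower() pipeline by a single pass
-- that lowercases letters and collapses/strips spaces on the fly.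

-- ===== PORT A =====
def preprocessing (s : String) : String :=
  -- a = ""; for i in range(len(s)): if (ord-range test): a += s[i]
  let a : List Char := (PySem.List.pyRange 0 (PySem.Str.len s) 1).foldl
    (fun a i =>
      let c := PySem.List.pyGetD s.toList i ' '
      if ('A'.toNat ≤ c.toNat ∧ c.toNat ≤ 'Z'.toNat) ∨
         ('a'.toNat ≤ c.toNat ∧ c.toNat ≤ 'z'.toNat) ∨
         c.toNat = ' '.toNat
      then a ++ [c] else a) []
  -- a = ' '.join(a.split()); a = a.lower()
  String.ofList (PySem.Chars.lower (PySem.Chars.join [' '] (PySem.Chars.split₀ a)))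

-- ===== PORT B =====
-- one step of B's loop over the characters: state = (out, last_space)
def bstep (st : List Char × Bool) (c : Char) : List Char × Bool :=
  let o := c.toNat
  if 65 ≤ o ∧ o ≤ 90 then (st.1 ++ [Char.ofNat (o + 32)], false)
  else if 97 ≤ o ∧ o ≤ 122 then (st.1 ++ [c], false)
  else if o = 32 then
    (if st.1 ≠ [] ∧ st.2 = false then (st.1 ++ [' '], true) else st)
  else st

-- if out and out[-1] == ' ': out.pop()
def btrim (st : List Char × Bool) : List Char :=
  if st.1.getLast? = some ' ' then st.1.dropLast else st.1

def preprocessing_alt (s : String) : String :=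
  String.ofList (btrim (s.toList.foldl bstep ([], false)))

-- ===== PRECONDITION & SPEC =====
def Spec_preprocessing (s : String) (out : String) : Prop := out = preprocessing_alt s
instance (s : String) (out : String) : Decidable (Spec_preprocessing s out) := by unfold Spec_preprocessing; infer_instance

-- ===== CLAIM (what is proved, stated in full; the proofs are below) =====
def Claim_equal_preprocessing : Prop := ∀ (s : String), Dom_preprocessing s → Spec_preprocessing s (preprocessing s)

-- ===== LEMMAS AND PROOFS =====

-- the character class A keeps / B acts on, and its letter part
def keepC (c : Char) : Bool :=
  (65 ≤ c.toNat && c.toNat ≤ 90) || (97 ≤ c.toNat && c.toNat ≤ 122) || (c.toNat == 32)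

def letterC (c : Char) : Bool :=
  (65 ≤ c.toNat && c.toNat ≤ 90) || (97 ≤ c.toNat && c.toNat ≤ 122)

-- lowered, space-interleaved join of a word list, recursively
def J : List (List Char) → List Char
  | [] => []
  | [w] => PySem.Chars.lower w
  | w :: ws => PySem.Chars.lower w ++ ' ' :: J ws

-- B-state corresponding to split₀.go's (cur, acc) state
def encode (cur : List Char) (acc : List (List Char)) : List Char × Bool :=
  if cur = [] then
    (if acc = [] then ([], false) else (J acc.reverse ++ [' '], true))
  else
    ((if acc = [] then [] else J acc.reverse ++ [' ']) ++ PySem.Chars.lower cur.reverse, false)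

lemma J_cons_ne (w : List Char) (ws : List (List Char)) (h : ws ≠ []) :
    J (w :: ws) = PySem.Chars.lower w ++ ' ' :: J ws := by
  cases ws with
  | nil => exact absurd rfl h
  | cons v vs => rfl

lemma lower_append (a b : List Char) :
    PySem.Chars.lower (a ++ b) = PySem.Chars.lower a ++ PySem.Chars.lower b := by
  simp [PySem.Chars.lower]

lemma J_eq_lower_join (ws : List (List Char)) :
    J ws = PySem.Chars.lower (PySem.Chars.join [' '] ws) := by
  induction ws with
  | nil => simp [J, PySem.Chars.join_nil, PySem.Chars.lower]
  | cons w ws ih =>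
    cases ws with
    | nil => rw [PySem.Chars.join_singleton]; rfl
    | cons v vs =>
      rw [J_cons_ne _ _ (by simp), ih, PySem.Chars.join_cons_cons, lower_append, lower_append]
      have : PySem.Chars.lower [' '] = [' '] := by decide
      simp [this]

lemma J_append_singleton (ws : List (List Char)) (w : List Char) :
    J (ws ++ [w]) = (if ws = [] then [] else J ws ++ [' ']) ++ PySem.Chars.lower w := by
  induction ws with
  | nil => simp [J]
  | cons v vs ih =>
    cases vs with
    | nil => simp [J]
    | cons u us =>
      rw [List.cons_append, J_cons_ne v ((u :: us) ++ [w]) (by simp), ih, if_neg (by simp),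
          if_neg (by simp), J_cons_ne v (u :: us) (by simp)]
      simp

lemma isupper_iff (c : Char) : PySem.Chars.isupper c = true ↔ 65 ≤ c.toNat ∧ c.toNat ≤ 90 := by
  simp only [PySem.Chars.isupper, Bool.and_eq_true, decide_eq_true_eq, Char.le_def,
    UInt32.le_iff_toNat_le]
  constructor <;> exact fun h => ⟨h.1, h.2⟩

lemma lowerChar_upper (c : Char) (h : 65 ≤ c.toNat ∧ c.toNat ≤ 90) :
    PySem.Chars.lowerChar c = Char.ofNat (c.toNat + 32) := by
  rw [PySem.Chars.lowerChar, if_pos ((isupper_iff c).mpr h)]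

lemma lowerChar_lower (c : Char) (h : 97 ≤ c.toNat) :
    PySem.Chars.lowerChar c = c := by
  rw [PySem.Chars.lowerChar, if_neg]
  intro hu
  have := (isupper_iff c).mp hu
  omega

lemma lowerChar_letter_bounds (c : Char) (h : letterC c = true) :
    97 ≤ (PySem.Chars.lowerChar c).toNat ∧ (PySem.Chars.lowerChar c).toNat ≤ 122 := by
  simp [letterC] at h
  rcases h with h | h
  · rw [lowerChar_upper c h, Char.toNat_ofNat]
    have : (c.toNat + 32).isValidChar := Or.inl (by omega)
    simp [this]
    omega
  · rw [lowerChar_lower c h.1]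
    omega

lemma lower_ne_nil (w : List Char) (h : w ≠ []) : PySem.Chars.lower w ≠ [] := by
  simp [PySem.Chars.lower, h]

-- last char of anything ending in a lowered nonempty letter word is not a space
lemma getLast?_append_lower_ne_space (ys w : List Char) (hw : w ≠ [])
    (hl : ∀ c ∈ w, letterC c = true) :
    (ys ++ PySem.Chars.lower w).getLast? ≠ some ' ' := by
  rw [List.getLast?_append_of_ne_nil _ (lower_ne_nil w hw)]
  intro hc
  have hmem := List.mem_of_getLast? hc
  simp only [PySem.Chars.lower, List.mem_map] at hmem
  obtain ⟨c, hc', heq⟩ := hmem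
  have := lowerChar_letter_bounds c (hl c hc')
  rw [heq] at this
  simp [Char.toNat] at this

lemma bskip (c : Char) (h : keepC c = false) (st : List Char × Bool) : bstep st c = st := by
  simp [keepC] at h
  rw [bstep]
  split_ifs with h1 h2 h3 <;> first | rfl | omega

lemma foldl_bstep_filter (cs : List Char) (st : List Char × Bool) :
    cs.foldl bstep st = (cs.filter keepC).foldl bstep st := by
  induction cs generalizing st with
  | nil => rfl
  | cons c cs ih =>
    by_cases h : keepC c = true
    · simp [h, ih]
    · simp only [Bool.not_eq_true] at h
      simp [h, bskip c h, ih]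

lemma isspace_of_keep (c : Char) (h : keepC c = true) :
    PySem.Chars.isspace c = (c.toNat == 32) := by
  simp [keepC] at h
  simp only [PySem.Chars.isspace]
  rw [Bool.eq_iff_iff]
  simp
  omega

lemma encode_nil_nil : encode [] [] = ([], false) := by simp [encode]

lemma encode_nil (acc : List (List Char)) (ha : acc ≠ []) :
    encode [] acc = (J acc.reverse ++ [' '], true) := by simp [encode, ha]

lemma encode_cons (cur : List Char) (acc : List (List Char)) (hc : cur ≠ []) :
    encode cur acc
      = ((if acc = [] then [] else J acc.reverse ++ [' ']) ++ PySem.Chars.lower cur.reverse,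
         false) := by
  simp [encode, hc]

-- invariant: each word collected by split₀.go corresponds to B's running state
lemma main_invariant (ks : List Char) (cur : List Char) (acc : List (List Char))
    (hks : ∀ c ∈ ks, keepC c = true) (hcur : ∀ c ∈ cur, letterC c = true)
    (hacc : ∀ w ∈ acc, w ≠ [] ∧ ∀ c ∈ w, letterC c = true) :
    PySem.Chars.lower (PySem.Chars.join [' '] (PySem.Chars.split₀.go ks cur acc))
      = btrim (ks.foldl bstep (encode cur acc)) := by
  induction ks generalizing cur acc with
  | nil =>
    rw [PySem.Chars.split₀.go, List.foldl_nil]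
    by_cases hc : cur = []
    · subst hc
      simp only [List.isEmpty_nil, if_pos]
      by_cases ha : acc = []
      · subst ha
        rw [encode_nil_nil]
        simp [PySem.Chars.join_nil, PySem.Chars.lower, btrim]
      · rw [← J_eq_lower_join, encode_nil acc ha, btrim]
        rw [if_pos (by simp), List.dropLast_concat]
    · rw [if_neg (by simpa using hc), List.reverse_cons, ← J_eq_lower_join,
        J_append_singleton, encode_cons cur acc hc, btrim,
        if_neg (getLast?_append_lower_ne_space _ _ (by simpa using hc)
          (by intro x hx; exact hcur x (by simpa using hx)))]
      simp [List.reverse_eq_nil_iff]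
  | cons c rest ih =>
    have hkc : keepC c = true := hks c (List.mem_cons_self ..)
    have hrest : ∀ x ∈ rest, keepC x = true := fun x hx => hks x (List.mem_cons_of_mem _ hx)
    rw [PySem.Chars.split₀.go, List.foldl_cons]
    by_cases hsp : c.toNat = 32
    · -- c is the space character: split₀ closes the current word, B emits at most one space
      rw [isspace_of_keep c hkc, if_pos (by simpa using hsp)]
      have hbs : bstep (encode cur acc) c = encode []
          (if cur = [] then acc else cur.reverse :: acc) := by
        by_cases hc : cur = []
        · subst hc
          rw [if_pos rfl]
          by_cases ha : acc = []
          · subst ha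
            rw [encode_nil_nil, bstep]
            rw [if_neg (by omega), if_neg (by omega), if_pos hsp, if_neg (by simp)]

          · rw [encode_nil acc ha, bstep]
            rw [if_neg (by omega), if_neg (by omega), if_pos hsp, if_neg (by simp)]
        · rw [if_neg hc, encode_cons cur acc hc, bstep]
          rw [if_neg (by omega), if_neg (by omega), if_pos hsp,
            if_pos ⟨by
                intro hnil
                exact lower_ne_nil cur.reverse (by simpa using hc)
                  (List.append_eq_nil_iff.mp hnil).2,
              rfl⟩,
            encode_nil _ (by simp), List.reverse_cons, J_append_singleton]
          simp [List.reverse_eq_nil_iff]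
      by_cases hc : cur = []
      · rw [if_pos (by simpa using hc), ih [] acc hrest (by simp) hacc, hbs, if_pos hc]
      · rw [if_neg (by simpa using hc), ih [] (cur.reverse :: acc) hrest (by simp)
          (by
            intro w hw
            rcases List.mem_cons.mp hw with h | h
            · subst h
              exact ⟨by simpa using hc, by intro x hx; exact hcur x (by simpa using hx)⟩
            · exact hacc w h),
          hbs, if_neg hc]
    · -- c is a letter: split₀ extends cur, B appends the lowered letter
      have hlet : letterC c = true := by simp [keepC] at hkc; simp [letterC]; omega
      rw [isspace_of_keep c hkc, if_neg (by simpa using hsp)]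
      have hstep : ∀ (out : List Char) (b : Bool),
          bstep (out, b) c = (out ++ [PySem.Chars.lowerChar c], false) := by
        intro out b
        simp [letterC] at hlet
        rcases hlet with h | h
        · rw [lowerChar_upper c h, bstep, if_pos h]
        · rw [lowerChar_lower c h.1, bstep, if_neg (by omega), if_pos h]
      have hbs : bstep (encode cur acc) c = encode (c :: cur) acc := by
        by_cases hc : cur = []
        · subst hc
          by_cases ha : acc = []
          · subst ha
            rw [encode_nil_nil, hstep, encode_cons [c] [] (by simp)]
            simp [PySem.Chars.lower]
          · rw [encode_nil acc ha, hstep, encode_cons [c] acc (by simp), if_neg ha]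
            simp [PySem.Chars.lower]
        · rw [encode_cons cur acc hc, hstep, encode_cons (c :: cur) acc (by simp),
            List.reverse_cons, lower_append]
          simp [PySem.Chars.lower, List.append_assoc]
      rw [ih (c :: cur) acc hrest
        (by
          intro x hx
          rcases List.mem_cons.mp hx with h | h
          · subst h; exact hlet
          · exact hcur x h) hacc, hbs]

-- A's loop builds exactly the kept characters, in order
lemma A_closed (s : String) :
    preprocessing s = String.ofList (PySem.Chars.lower (PySem.Chars.join [' ']
      (PySem.Chars.split₀ (s.toList.filter keepC)))) := by
  rw [preprocessing]
  have h1 : (PySem.List.pyRange 0 (PySem.Str.len s) 1).foldl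
      (fun a i =>
        let c := PySem.List.pyGetD s.toList i ' '
        if ('A'.toNat ≤ c.toNat ∧ c.toNat ≤ 'Z'.toNat) ∨
           ('a'.toNat ≤ c.toNat ∧ c.toNat ≤ 'z'.toNat) ∨
           c.toNat = ' '.toNat
        then a ++ [c] else a) ([] : List Char)
      = s.toList.filter keepC := by
    have h2 := PySem.List.foldl_pyRange_zero_pyGetD' s.toList ' '
      (fun a c =>
        if ('A'.toNat ≤ c.toNat ∧ c.toNat ≤ 'Z'.toNat) ∨
           ('a'.toNat ≤ c.toNat ∧ c.toNat ≤ 'z'.toNat) ∨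
           c.toNat = ' '.toNat
        then a ++ [c] else a) ([] : List Char)
    simp only [PySem.Str.len_eq] at h2 ⊢
    rw [h2, PySem.List.foldl_append_ite_eq_filter, List.nil_append]
    apply List.filter_congr
    intro c _
    rw [Bool.eq_iff_iff, keepC]
    simp
    omega
  rw [h1]

-- ===== VERDICT (by name: the statement is the Claim_ definition above) =====
theorem preprocessing_spec : Claim_equal_preprocessing := by
  intro s _
  unfold Spec_preprocessing
  rw [A_closed, preprocessing_alt, foldl_bstep_filter]
  rw [PySem.Chars.split₀,
    main_invariant (s.toList.filter keepC) [] []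
      (by intro c hc; exact (List.mem_filter.mp hc).2) (by simp) (by simp)]
  rfl
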